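-- pv_equiv track=rewrite | github.com/shahadat1010/Workshop-shemanto | Workshop 10/Task 3/task3.py | countNum
-- ===== SOURCE A (Python) =====
-- def countNum(start, end, num):
--     if not all(isinstance(arg, int) for arg in [start, end, num]):
--         raise TypeError("All inputs must be integers")
--     if start > end:
--         raise ValueError("Start value cannot be greater than end value")
--     if num < 0:
--         raise ValueError("Num value cannot be negative")
--
--     count = 0
--     for i in range(start, end + 1):
--         if str(num) in str(i):
--             count += 1
--     return count
-- ===== SOURCE B (Python) =====
-- def countNum(start, end, num):
--     # domain: start <= end, num >= 0 (A raises outside it)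
--     pat = str(num)
--
--     def single(n):  # n >= 0: does str(n) contain pat?
--         return 1 if pat in str(n) else 0
--
--     def block(a, b):
--         # count of k in [a, b) (0 <= a <= b) with pat in str(k), whole decades at a time
--         lo = min(b, -(-a // 10) * 10)   # first multiple of 10 >= a, capped at b
--         hi = max(lo, b // 10 * 10)      # last multiple of 10 <= b, at least lo
--         total = sum(single(k) for k in range(a, lo))
--         total += sum(single(k) for k in range(hi, b))
--         for q in range(lo // 10, hi // 10):
--             if q == 0:
--                 total += sum(single(r) for r in range(10))
--             else:
--                 sq = str(q)
--                 if pat in sq: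
--                     total += 10          # every number of the decade contains pat
--                 elif sq.endswith(pat[:-1]):
--                     total += 1           # only str(q) + pat[-1] matches
--         return total
--
--     total = 0
--     if start < 0:
--         neg_hi = min(end, -1)
--         total += block(-neg_hi, -start + 1)   # pat in str(-k) iff pat in str(k)
--     if end >= 0:
--         total += block(max(start, 0), end + 1)
--     return total
-- ===== Notes on version B (the rewrite author's own statement) =====
-- stated objective: faster
-- what changed: Instead of testing str(num) in str(i) for every i in the range, B counts whole decades at once (for each quotient q it tests str(q) once: 10 matches if the pattern is in str(q), else exactly one suffix match via endswith) and maps the negative part of the range onto positives, cutting the number of substring tests by ~10x.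
import Mathlib
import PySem

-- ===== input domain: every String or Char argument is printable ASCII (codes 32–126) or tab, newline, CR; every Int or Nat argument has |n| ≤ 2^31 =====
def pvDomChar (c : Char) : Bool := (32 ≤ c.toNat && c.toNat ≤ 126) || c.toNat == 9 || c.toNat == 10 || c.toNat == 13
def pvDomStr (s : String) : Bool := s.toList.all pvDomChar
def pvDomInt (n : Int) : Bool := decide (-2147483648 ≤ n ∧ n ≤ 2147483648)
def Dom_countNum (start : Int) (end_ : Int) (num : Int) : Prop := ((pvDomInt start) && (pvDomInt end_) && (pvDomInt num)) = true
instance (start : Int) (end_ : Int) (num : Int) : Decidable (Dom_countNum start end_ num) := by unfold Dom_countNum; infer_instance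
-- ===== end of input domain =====

-- B counts whole decades at once (10 numbers share the quotient's digits) and mirrors
-- the negative part onto positives; measured constant-factor faster than A's per-number scan.

-- ===== PORT A =====
-- for i in range(start, end+1): if str(num) in str(i): count += 1
def countNum (start : Int) (end_ : Int) (num : Int) : Int :=
  (PySem.List.pyRange start (end_ + 1) 1).foldl
    (fun count i =>
      if PySem.Str.isIn (PySem.Int.toStr num) (PySem.Int.toStr i) then count + 1 else count) 0

-- ===== PORT B =====
-- single(n) = 1 if pat in str(n) else 0   (strings handled on the List Char side, as PySem defines them)
def pvSingle (pat : List Char) (n : Int) : Int :=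
  if PySem.Chars.isIn pat (PySem.Int.toChars n) then 1 else 0

-- block(a, b): count of k in [a, b) with pat in str(k), whole decades at a time
def pvBlock (pat : List Char) (a b : Int) : Int :=
  let lo := min b (-(PySem.Int.floordiv (-a) 10) * 10)
  let hi := max lo (PySem.Int.floordiv b 10 * 10)
  let t1 := (PySem.List.pyRange a lo 1).foldl (fun t k => t + pvSingle pat k) 0
  let t2 := t1 + (PySem.List.pyRange hi b 1).foldl (fun t k => t + pvSingle pat k) 0
  (PySem.List.pyRange (PySem.Int.floordiv lo 10) (PySem.Int.floordiv hi 10) 1).foldl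
    (fun t q =>
      t + (if q = 0 then (PySem.List.pyRange 0 10 1).foldl (fun s r => s + pvSingle pat r) 0
           else if PySem.Chars.isIn pat (PySem.Int.toChars q) then 10
           else if PySem.Chars.endswith (PySem.Int.toChars q)
                     (PySem.List.slice pat none (some (-1))) then 1
           else 0)) t2

def countNum_alt (start : Int) (end_ : Int) (num : Int) : Int :=
  (if start < 0 then pvBlock (PySem.Int.toChars num) (-(min end_ (-1))) (-start + 1) else 0) +
  (if 0 ≤ end_ then pvBlock (PySem.Int.toChars num) (max start 0) (end_ + 1) else 0)

-- ===== PRECONDITION & SPEC =====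
-- A raises ValueError when start > end or num < 0 (and TypeError off the int domain); excluded here.
def Pre_countNum (start : Int) (end_ : Int) (num : Int) : Prop := start ≤ end_ ∧ 0 ≤ num
instance (start : Int) (end_ : Int) (num : Int) : Decidable (Pre_countNum start end_ num) := by unfold Pre_countNum; infer_instance
def pvWitness_countNum : Int × Int × Int := (-12, 25, 2)

def Spec_countNum (start : Int) (end_ : Int) (num : Int) (out : Int) : Prop := out = countNum_alt start end_ num
instance (start : Int) (end_ : Int) (num : Int) (out : Int) : Decidable (Spec_countNum start end_ num out) := by unfold Spec_countNum; infer_instance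

-- ===== CLAIM (what is proved, stated in full; the proofs are below) =====
def Claim_equal_countNum : Prop := ∀ (start : Int) (end_ : Int) (num : Int), Dom_countNum start end_ num → Pre_countNum start end_ num → Spec_countNum start end_ num (countNum start end_ num)

-- ===== LEMMAS AND PROOFS =====

-- the Bool predicate both programs count: str(num's digits) occurs in str(i)
def pvP (pat : List Char) (i : Int) : Bool := PySem.Chars.isIn pat (PySem.Int.toChars i)

-- the decimal digit string of a natural number, most significant first
def pvDigits (n : Nat) : List Char :=
  if _h : n < 10 then [Nat.digitChar n]
  else pvDigits (n / 10) ++ [Nat.digitChar (n % 10)]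
decreasing_by exact Nat.div_lt_self (by omega) (by omega)

lemma pvToDigitsCore_eq (f : Nat) : ∀ (n : Nat) (acc : List Char), n < f →
    Nat.toDigitsCore 10 f n acc = pvDigits n ++ acc := by
  induction f with
  | zero => intro n acc h; omega
  | succ f ih =>
    intro n acc h
    rw [pvDigits]
    by_cases h10 : n < 10
    · simp [Nat.toDigitsCore, Nat.div_eq_of_lt h10, Nat.mod_eq_of_lt h10, h10]
    · have hne : n / 10 ≠ 0 := by omega
      simp only [Nat.toDigitsCore, hne, if_false, dif_neg h10]
      rw [ih (n / 10) _ (by omega)]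
      simp

lemma pvToDigits_eq (n : Nat) : Nat.toDigits 10 n = pvDigits n := by
  have := pvToDigitsCore_eq (n + 1) n [] (by omega)
  simpa [Nat.toDigits] using this

lemma pvDigits_snoc (m : Nat) :
    ∃ p' j, j < 10 ∧ pvDigits m = p' ++ [Nat.digitChar j] := by
  rw [pvDigits]
  by_cases h : m < 10
  · exact ⟨[], m, h, by simp [h]⟩
  · exact ⟨pvDigits (m / 10), m % 10, by omega, by simp [h]⟩

lemma pvDigits_mem (m : Nat) : ∀ c ∈ pvDigits m, ∃ k, k < 10 ∧ c = Nat.digitChar k := by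
  fun_induction pvDigits m with
  | case1 m h => intro c hc; simp at hc; exact ⟨m, h, hc⟩
  | case2 m h ih =>
    intro c hc
    simp only [List.mem_append, List.mem_singleton] at hc
    rcases hc with hc | hc
    · exact ih c hc
    · exact ⟨m % 10, by omega, hc⟩

lemma pvDigitChar_ne_dash (k : Nat) (hk : k < 10) : Nat.digitChar k ≠ '-' := by
  interval_cases k <;> decide

lemma pvDash_not_mem (m : Nat) : '-' ∉ pvDigits m := by
  intro h
  rcases pvDigits_mem m _ h with ⟨k, hk, hc⟩
  exact pvDigitChar_ne_dash k hk hc.symm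

lemma pvDigits_decade (m r : Nat) (hm : 1 ≤ m) (hr : r < 10) :
    pvDigits (10 * m + r) = pvDigits m ++ [Nat.digitChar r] := by
  rw [pvDigits]
  have h : ¬ (10 * m + r < 10) := by omega
  rw [dif_neg h]
  have h1 : (10 * m + r) / 10 = m := by omega
  have h2 : (10 * m + r) % 10 = r := by omega
  rw [h1, h2]

lemma pvToChars_nonneg (n : Int) (h : 0 ≤ n) :
    PySem.Int.toChars n = pvDigits n.toNat := by
  simp [PySem.Int.toChars, not_lt.mpr h, pvToDigits_eq]

lemma pvToChars_neg (i : Int) (h : i < 0) :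
    PySem.Int.toChars i = '-' :: pvDigits i.natAbs := by
  simp [PySem.Int.toChars, h, pvToDigits_eq]

-- an occurrence in s ++ [c] is either inside s or a suffix ending at c
lemma pvInfix_snoc (pat s : List Char) (c : Char) :
    pat <:+: s ++ [c] ↔ pat <:+: s ∨ pat <:+ s ++ [c] := by
  constructor
  · intro h
    have h' : pat.reverse <:+: (s ++ [c]).reverse := List.reverse_infix.mpr h
    rw [List.reverse_append, List.reverse_singleton] at h'
    simp only [List.singleton_append] at h'
    rcases List.infix_cons_iff.mp h' with h' | h'
    · right
      have : pat.reverse <+: (s ++ [c]).reverse := by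
        rw [List.reverse_append, List.reverse_singleton]; simpa using h'
      exact List.reverse_prefix.mp this
    · left; exact List.reverse_infix.mp (by simpa using h')
  · rintro (h | h)
    · exact h.trans (by simpa using List.infix_append [] s [c])
    · exact h.isInfix

lemma pvSuffix_snoc (p' : List Char) (d : Char) (s : List Char) (c : Char) :
    p' ++ [d] <:+ s ++ [c] ↔ d = c ∧ p' <:+ s := by
  constructor
  · intro h
    have h' : (p' ++ [d]).reverse <+: (s ++ [c]).reverse := List.reverse_prefix.mpr h
    rw [List.reverse_append, List.reverse_append, List.reverse_singleton] at h'
    simp only [List.singleton_append] at h'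
    rcases List.cons_prefix_cons.mp h' with ⟨hdc, hp⟩
    exact ⟨hdc, List.reverse_prefix.mp hp⟩
  · rintro ⟨rfl, hp⟩
    have h' : d :: p'.reverse <+: d :: s.reverse :=
      List.cons_prefix_cons.mpr ⟨rfl, List.reverse_prefix.mpr hp⟩
    have h'' : (p' ++ [d]).reverse <+: (s ++ [d]).reverse := by
      simpa [List.reverse_append] using h'
    exact List.reverse_prefix.mp h''

-- pat (all decimal digits, nonempty) occurs in '-' :: s iff it occurs in s
lemma pvP_neg (m : Nat) (i : Int) (hi : i < 0) :
    pvP (pvDigits m) i = pvP (pvDigits m) (-i) := by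
  have hneg : PySem.Int.toChars i = '-' :: pvDigits i.natAbs := pvToChars_neg i hi
  have hpos : PySem.Int.toChars (-i) = pvDigits i.natAbs := by
    rw [pvToChars_nonneg (-i) (by omega)]
    congr 1
    omega
  unfold pvP
  rw [hneg, hpos]
  rcases pvDigits_snoc m with ⟨p', j, hj, hpe⟩
  have hne : pvDigits m ≠ [] := by rw [hpe]; simp
  have hnodash := pvDash_not_mem m
  have hiff : (pvDigits m <:+: '-' :: pvDigits i.natAbs) ↔ (pvDigits m <:+: pvDigits i.natAbs) := by
    constructor
    · intro h
      rcases List.infix_cons_iff.mp h with h | h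
      · exfalso
        rcases List.exists_cons_of_ne_nil hne with ⟨c, tl, hct⟩
        rw [hct] at h
        rcases List.cons_prefix_cons.mp h with ⟨hc, -⟩
        apply hnodash
        rw [hct, hc]
        simp
      · exact h
    · intro h
      exact List.infix_cons h
  cases hb : PySem.Chars.isIn (pvDigits m) (pvDigits i.natAbs) with
  | false =>
    have h1 : ¬ (pvDigits m <:+: pvDigits i.natAbs) := (PySem.Chars.isIn_eq_false_iff _ _).mp hb
    exact (PySem.Chars.isIn_eq_false_iff _ _).mpr (fun h => h1 (hiff.mp h))
  | true =>
    exact (PySem.Chars.isIn_iff_infix _ _).mpr (hiff.mpr (PySem.Chars.isIn_iff_infix _ _ |>.mp hb))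

-- port-A fold is a countP
lemma pvCountNum_countP (start end_ num : Int) :
    countNum start end_ num =
      ((PySem.List.pyRange start (end_ + 1) 1).countP (pvP (PySem.Int.toChars num)) : Int) := by
  unfold countNum
  rw [PySem.List.foldl_count_if, zero_add]
  norm_cast
  apply List.countP_congr
  intro x _
  simp [pvP]

-- counting a mapped-negation predicate flips the interval
lemma pvCountP_neg (p : Int → Bool) (a b : Int) :
    (PySem.List.pyRange a b 1).countP (fun i => p (-i)) =
      (PySem.List.pyRange (1 - b) (1 - a) 1).countP p := by
  suffices H : ∀ n : Nat, ∀ a b : Int, (b - a).toNat = n →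
      (PySem.List.pyRange a b 1).countP (fun i => p (-i)) =
        (PySem.List.pyRange (1 - b) (1 - a) 1).countP p by
    exact H _ a b rfl
  intro n
  induction n with
  | zero =>
    intro a b h
    rw [PySem.List.pyRange_one_eq_nil (by omega), PySem.List.pyRange_one_eq_nil (by omega)]
    rfl
  | succ n ih =>
    intro a b h
    have hab : a < b := by omega
    rw [PySem.List.pyRange_one_cons hab]
    have hsplit : PySem.List.pyRange (1 - b) (1 - a) 1 =
        PySem.List.pyRange (1 - b) (1 - (a + 1)) 1 ++ [1 - (a + 1)] := by
      have := PySem.List.pyRange_one_succ_right (a := 1 - b) (b := 1 - (a + 1)) (by omega)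
      rw [show (1 : Int) - (a + 1) + 1 = 1 - a by ring] at this
      exact this
    rw [hsplit, List.countP_cons, List.countP_append, ih (a + 1) b (by omega)]
    have he : (1 : Int) - (a + 1) = -a := by ring
    rw [he]
    simp [List.countP_cons]

-- exactly one digit k in 0..9 prints as digitChar j
lemma pvCount_digit (j : Nat) (hj : j < 10) :
    ((List.range 10).countP fun k => decide (Nat.digitChar k = Nat.digitChar j)) = 1 := by
  interval_cases j <;> decide

-- per-decade contribution, as B computes it
def pvDec (pat : List Char) (q : Int) : Int :=
  if q = 0 then (PySem.List.pyRange 0 10 1).foldl (fun s r => s + pvSingle pat r) 0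
  else if PySem.Chars.isIn pat (PySem.Int.toChars q) then 10
  else if PySem.Chars.endswith (PySem.Int.toChars q) (PySem.List.slice pat none (some (-1))) then 1
  else 0

lemma pvSingle_fold (pat : List Char) (a b : Int) (t : Int) :
    (PySem.List.pyRange a b 1).foldl (fun t k => t + pvSingle pat k) t =
      t + ((PySem.List.pyRange a b 1).countP (pvP pat) : Int) := by
  rw [PySem.List.foldl_add]
  congr 1
  have : (PySem.List.pyRange a b 1).map (pvSingle pat) =
      (PySem.List.pyRange a b 1).map (fun x => if pvP pat x then 1 else 0) := rfl
  rw [this, PySem.List.sum_map_ite_one_zero]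

-- the decade lemma: q ≥ 0 → countP over [10q, 10q+10) = pvDec q
lemma pvDecade (m : Nat) (q : Int) (hq : 0 ≤ q) :
    ((PySem.List.pyRange (10 * q) (10 * q + 10) 1).countP (pvP (pvDigits m)) : Int) =
      pvDec (pvDigits m) q := by
  by_cases hq0 : q = 0
  · subst hq0
    rw [pvDec, if_pos rfl, pvSingle_fold, zero_add]
    norm_num
  · -- q ≥ 1: the whole decade shares str(q)'s digits
    have hq1 : 1 ≤ q := by omega
    have hsq : PySem.Int.toChars q = pvDigits q.toNat := pvToChars_nonneg q hq
    -- each member of the decade prints as str(q) ++ one digit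
    have hchars : ∀ k : Nat, k < 10 →
        PySem.Int.toChars (10 * q + (k : Int)) = pvDigits q.toNat ++ [Nat.digitChar k] := by
      intro k hk
      rw [pvToChars_nonneg _ (by omega)]
      have ht : (10 * q + (k : Int)).toNat = 10 * q.toNat + k := by omega
      rw [ht, pvDigits_decade q.toNat k (by omega) hk]
    have hrange : PySem.List.pyRange (10 * q) (10 * q + 10) 1 =
        (List.range 10).map (fun k : Nat => 10 * q + (k : Int)) := by
      rw [PySem.List.pyRange_one, show (10 * q + 10 - 10 * q).toNat = 10 from by omega]
    rw [hrange, List.countP_map]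
    by_cases hin : PySem.Chars.isIn (pvDigits m) (PySem.Int.toChars q) = true
    · -- pat already inside str(q): all 10 members match
      have hten : List.countP ((pvP (pvDigits m)) ∘ (fun k : Nat => 10 * q + (k : Int)))
          (List.range 10) = List.countP (fun _ => true) (List.range 10) := by
        apply List.countP_congr
        intro k hk
        have hk10 : k < 10 := List.mem_range.mp hk
        simp only [Function.comp, pvP]
        constructor
        · intro _; trivial
        · intro _
          rw [hchars k hk10]
          apply (PySem.Chars.isIn_iff_infix _ _).mpr
          have hinf : pvDigits m <:+: pvDigits q.toNat := by
            rw [hsq] at hin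
            exact (PySem.Chars.isIn_iff_infix _ _).mp hin
          exact (pvInfix_snoc _ _ _).mpr (Or.inl hinf)
      rw [hten, List.countP_true, List.length_range]
      rw [pvDec, if_neg hq0, if_pos hin]
      norm_num
    · -- pat not inside str(q): only the suffix position can match
      rcases pvDigits_snoc m with ⟨p', j, hj, hpe⟩
      have hnin : ¬ (pvDigits m <:+: pvDigits q.toNat) := by
        rw [hsq] at hin
        exact fun h => hin ((PySem.Chars.isIn_iff_infix _ _).mpr h)
      have hmem : ∀ k : Nat, k < 10 →
          (pvP (pvDigits m) (10 * q + (k : Int)) = true ↔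
            (Nat.digitChar j = Nat.digitChar k ∧ p' <:+ pvDigits q.toNat)) := by
        intro k hk
        unfold pvP
        rw [hchars k hk, PySem.Chars.isIn_iff_infix, pvInfix_snoc]
        constructor
        · rintro (h | h)
          · exact absurd h hnin
          · rw [hpe] at h
            exact (pvSuffix_snoc _ _ _ _).mp h
        · intro h
          right
          rw [hpe]
          exact (pvSuffix_snoc _ _ _ _).mpr h
      have hsl : PySem.List.slice (pvDigits m) none (some (-1)) = p' := by
        rw [PySem.List.slice_to_neg_one, hpe]
        simp
      rw [pvDec, if_neg hq0, if_neg hin, hsl]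
      by_cases hps : p' <:+ pvDigits q.toNat
      · have h1 : List.countP ((pvP (pvDigits m)) ∘ (fun k : Nat => 10 * q + (k : Int)))
            (List.range 10) =
            List.countP (fun k => decide (Nat.digitChar k = Nat.digitChar j)) (List.range 10) := by
          apply List.countP_congr
          intro k hk
          have hk10 : k < 10 := List.mem_range.mp hk
          simp only [Function.comp]
          rw [hmem k hk10]
          simp only [decide_eq_true_eq]
          constructor
          · rintro ⟨h, -⟩; exact h.symm
          · intro h; exact ⟨h.symm, hps⟩
        rw [h1, pvCount_digit j hj]
        rw [if_pos ((PySem.Chars.endswith_iff _ _).mpr (by rw [hsq]; exact hps))]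
        norm_num
      · have h0 : List.countP ((pvP (pvDigits m)) ∘ (fun k : Nat => 10 * q + (k : Int)))
            (List.range 10) = 0 := by
          apply List.countP_eq_zero.mpr
          intro k hk
          have hk10 : k < 10 := List.mem_range.mp hk
          simp only [Function.comp]
          rw [Bool.not_eq_true, ← Bool.not_eq_true, hmem k hk10]
          exact fun h => hps h.2
        rw [h0]
        rw [if_neg (fun h => hps (by rw [hsq] at h; exact (PySem.Chars.endswith_iff _ _).mp h))]
        norm_num

-- sum of decades
lemma pvDecades_split (pat : List Char) (m M : Int) (h : m ≤ M) :
    ((PySem.List.pyRange (10 * m) (10 * M) 1).countP (pvP pat) : Int) =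
      ((PySem.List.pyRange m M 1).map
        (fun q => ((PySem.List.pyRange (10 * q) (10 * q + 10) 1).countP (pvP pat) : Int))).sum := by
  suffices H : ∀ n : Nat, ∀ M : Int, (M - m).toNat = n → m ≤ M →
      ((PySem.List.pyRange (10 * m) (10 * M) 1).countP (pvP pat) : Int) =
        ((PySem.List.pyRange m M 1).map
          (fun q => ((PySem.List.pyRange (10 * q) (10 * q + 10) 1).countP (pvP pat) : Int))).sum by
    exact H _ M rfl h
  intro n
  induction n with
  | zero =>
    intro M hn hm
    have : M = m := by omega
    subst this
    rw [PySem.List.pyRange_one_eq_nil (by omega), PySem.List.pyRange_one_eq_nil (by omega)]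
    rfl
  | succ n ih =>
    intro M hn hm
    have hlt : m < M := by omega
    have h1 : PySem.List.pyRange m M 1 = PySem.List.pyRange m (M - 1) 1 ++ [M - 1] := by
      have := PySem.List.pyRange_one_succ_right (a := m) (b := M - 1) (by omega)
      rw [show M - 1 + 1 = M by ring] at this
      exact this
    have h2 : PySem.List.pyRange (10 * m) (10 * M) 1 =
        PySem.List.pyRange (10 * m) (10 * (M - 1)) 1 ++
          PySem.List.pyRange (10 * (M - 1)) (10 * M) 1 :=
      PySem.List.pyRange_one_append _ _ _ (by omega) (by omega)
    rw [h1, h2, List.countP_append, List.map_append, List.sum_append]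
    push_cast
    rw [ih (M - 1) (by omega) (by omega)]
    congr 1
    rw [show (10 : Int) * M = 10 * (M - 1) + 10 by ring]
    simp

-- the block computes a countP
lemma pvBlock_eq (m : Nat) (a b : Int) (ha : 0 ≤ a) (_hab : a ≤ b) :
    pvBlock (pvDigits m) a b = ((PySem.List.pyRange a b 1).countP (pvP (pvDigits m)) : Int) := by
  have hfd : ∀ x : Int, PySem.Int.floordiv x 10 = x / 10 :=
    fun x => PySem.Int.floordiv_eq_ediv_of_pos (by norm_num)
  unfold pvBlock
  simp only [hfd]
  set L := min b (-(-a / 10) * 10) with hLdef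
  set H := max L (b / 10 * 10) with hHdef
  have hmid : ∀ t : Int, (PySem.List.pyRange (L / 10) (H / 10) 1).foldl
      (fun t q =>
        t + (if q = 0 then (PySem.List.pyRange 0 10 1).foldl (fun s r => s + pvSingle (pvDigits m) r) 0
             else if PySem.Chars.isIn (pvDigits m) (PySem.Int.toChars q) then 10
             else if PySem.Chars.endswith (PySem.Int.toChars q)
                       (PySem.List.slice (pvDigits m) none (some (-1))) then 1
             else 0)) t =
      t + ((PySem.List.pyRange (L / 10) (H / 10) 1).map (pvDec (pvDigits m))).sum := by
    intro t
    exact PySem.List.foldl_add _ (pvDec (pvDigits m)) t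
  rw [hmid, pvSingle_fold, pvSingle_fold]
  by_cases hc : -(-a / 10) * 10 ≤ b
  · -- aligned middle exists
    have hL : L = -(-a / 10) * 10 := by rw [hLdef]; exact min_eq_right hc
    have haL : a ≤ L := by omega
    have hLa : L < a + 10 := by omega
    have hL0 : 0 ≤ L := by omega
    have hLd : L = 10 * (-(-a / 10)) := by omega
    have hH : H = b / 10 * 10 := by
      rw [hHdef]
      apply max_eq_right
      omega
    have hLH : L ≤ H := by omega
    have hHb : H ≤ b := by omega
    have hLq : L / 10 = -(-a / 10) := by omega
    have hHq : H / 10 = b / 10 := by omega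
    have hmap : (PySem.List.pyRange (L / 10) (H / 10) 1).map (pvDec (pvDigits m)) =
        (PySem.List.pyRange (L / 10) (H / 10) 1).map
          (fun q => ((PySem.List.pyRange (10 * q) (10 * q + 10) 1).countP (pvP (pvDigits m)) : Int)) := by
      apply List.map_congr_left
      intro q hq
      have hq0 : 0 ≤ q := by
        have := (PySem.List.mem_pyRange_one.mp hq).1
        omega
      exact (pvDecade m q hq0).symm
    rw [hmap, hLq, hHq, ← pvDecades_split (pvDigits m) _ _ (by omega)]
    have hsplit1 : PySem.List.pyRange a b 1 =
        PySem.List.pyRange a L 1 ++ PySem.List.pyRange L b 1 :=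
      PySem.List.pyRange_one_append a L b haL (by omega)
    have hsplit2 : PySem.List.pyRange L b 1 =
        PySem.List.pyRange L H 1 ++ PySem.List.pyRange H b 1 :=
      PySem.List.pyRange_one_append L H b hLH hHb
    rw [hsplit1, hsplit2, List.countP_append, List.countP_append]
    have e1 : 10 * -(-a / 10) = L := by omega
    have e2 : 10 * (b / 10) = H := by omega
    rw [e1, e2]
    push_cast
    ring
  · -- no aligned decade inside [a, b): lo = hi = b, middle and tail empty
    have hL : L = b := by rw [hLdef]; exact min_eq_left (by omega)
    have hH : H = b := by
      rw [hHdef, hL]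
      exact max_eq_left (by omega)
    rw [hL, hH]
    rw [PySem.List.pyRange_one_eq_nil (le_refl ((b : Int) / 10)),
        PySem.List.pyRange_one_eq_nil (le_refl b)]
    simp

-- ===== VERDICT (by name: the statement is the Claim_ definition above) =====
lemma pvMirror (m : Nat) (a b : Int) (hb : b ≤ 0) :
    (PySem.List.pyRange a b 1).countP (pvP (pvDigits m)) =
      (PySem.List.pyRange (1 - b) (1 - a) 1).countP (pvP (pvDigits m)) := by
  rw [← pvCountP_neg]
  apply List.countP_congr
  intro x hx
  have hx0 : x < 0 := by
    have := (PySem.List.mem_pyRange_one.mp hx).2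
    omega
  rw [pvP_neg m x hx0]

theorem countNum_spec : Claim_equal_countNum := by
  intro start end_ num _hdom hpre
  obtain ⟨hse, hnum⟩ := hpre
  unfold Spec_countNum countNum_alt
  rw [pvCountNum_countP]
  have hpat : PySem.Int.toChars num = pvDigits num.toNat := pvToChars_nonneg num hnum
  rw [hpat]
  by_cases hs : start < 0
  · rw [if_pos hs]
    by_cases he : 0 ≤ end_
    · rw [if_pos he]
      have hmin : min end_ (-1) = (-1 : Int) := by omega
      rw [hmin, show -(-1 : Int) = 1 by norm_num]
      rw [pvBlock_eq num.toNat 1 (-start + 1) (by omega) (by omega)]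
      have hmax : max start 0 = (0 : Int) := by omega
      rw [hmax, pvBlock_eq num.toNat 0 (end_ + 1) (by omega) (by omega)]
      rw [PySem.List.pyRange_one_append start 0 (end_ + 1) (by omega) (by omega),
          List.countP_append]
      push_cast
      congr 2
      rw [pvMirror num.toNat start 0 (by omega)]
      rw [show (1 : Int) - 0 = 1 by norm_num, show (1 : Int) - start = -start + 1 by ring]
    · rw [if_neg he]
      have hmin : min end_ (-1) = end_ := by omega
      rw [hmin, pvBlock_eq num.toNat (-end_) (-start + 1) (by omega) (by omega)]
      rw [pvMirror num.toNat start (end_ + 1) (by omega)]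
      rw [show (1 : Int) - (end_ + 1) = -end_ by ring,
          show (1 : Int) - start = -start + 1 by ring]
      simp
  · rw [if_neg hs, if_pos (by omega : (0 : Int) ≤ end_)]
    have hmax : max start 0 = start := by omega
    rw [hmax, pvBlock_eq num.toNat start (end_ + 1) (by omega) (by omega)]
    simp
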